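-- pv_equiv track=rewrite | github.com/sweetpotato633/LoadIdentification | RawDataAnalysis.py | three_bytes_to_int
-- ===== SOURCE A (Python) =====
-- def three_bytes_to_int(dec_list):
--     if len(dec_list) != 3:
--         return  0
--
--     if dec_list[2] < 128:
--         res = dec_list[2]*65536 + dec_list[1]*256 + dec_list[0]
--     else:
--         dec_list = [255-n for n in dec_list]
--         res = dec_list[2] * 65536 + dec_list[1] * 256 + dec_list[0] + 1
--         res = res * -1
--     return res
-- ===== SOURCE B (Python) =====
-- def three_bytes_to_int(dec_list):
--     if len(dec_list) != 3:
--         return 0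
--     # Sign-extend the most significant byte, then accumulate big-endian with Horner's rule.
--     top = dec_list[2]
--     if top >= 128:
--         top -= 256
--     value = 0
--     for b in (top, dec_list[1], dec_list[0]):
--         value = value * 256 + b
--     return value
-- ===== Notes on version B (the rewrite author's own statement) =====
-- stated objective: simpler
-- what changed: B sign-extends the top byte once and then accumulates the three bytes big-endian with a Horner loop (value = value*256 + b), replacing A's two independent polynomial computations, one of which rebuilds a 255-complemented list and negates.
import Mathlib
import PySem

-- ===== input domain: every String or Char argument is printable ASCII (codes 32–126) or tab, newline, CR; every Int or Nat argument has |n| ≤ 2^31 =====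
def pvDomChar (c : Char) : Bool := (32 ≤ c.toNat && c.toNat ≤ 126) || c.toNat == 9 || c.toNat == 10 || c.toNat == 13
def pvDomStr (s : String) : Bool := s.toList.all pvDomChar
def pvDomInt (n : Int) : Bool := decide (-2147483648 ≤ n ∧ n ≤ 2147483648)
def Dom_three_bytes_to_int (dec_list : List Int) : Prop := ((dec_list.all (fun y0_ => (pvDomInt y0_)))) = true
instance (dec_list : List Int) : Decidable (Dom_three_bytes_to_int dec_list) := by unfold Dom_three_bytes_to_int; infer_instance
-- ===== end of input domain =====

-- B sign-extends the top byte once, then accumulates the bytes big-endian with a Horner loop,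
-- replacing A's two independent polynomial computations (one over a 255-complemented copy). Objective: simpler.

-- ===== PORT A =====
def three_bytes_to_int (dec_list : List Int) : Int :=
  if dec_list.length ≠ 3 then 0
  else if (PySem.List.pyGet? dec_list 2).getD 0 < 128 then
    (PySem.List.pyGet? dec_list 2).getD 0 * 65536 +
      (PySem.List.pyGet? dec_list 1).getD 0 * 256 +
      (PySem.List.pyGet? dec_list 0).getD 0
  else
    let dec_list' := dec_list.map (fun n => 255 - n)
    let res := (PySem.List.pyGet? dec_list' 2).getD 0 * 65536 +
      (PySem.List.pyGet? dec_list' 1).getD 0 * 256 +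
      (PySem.List.pyGet? dec_list' 0).getD 0 + 1
    res * -1

-- ===== PORT B =====
def three_bytes_to_int_alt (dec_list : List Int) : Int :=
  if dec_list.length ≠ 3 then 0
  else
    let top := (PySem.List.pyGet? dec_list 2).getD 0
    let top := if top ≥ 128 then top - 256 else top
    [top, (PySem.List.pyGet? dec_list 1).getD 0, (PySem.List.pyGet? dec_list 0).getD 0].foldl
      (fun value b => value * 256 + b) 0

-- ===== PRECONDITION & SPEC =====
def Spec_three_bytes_to_int (dec_list : List Int) (out : Int) : Prop := out = three_bytes_to_int_alt dec_list
instance (dec_list : List Int) (out : Int) : Decidable (Spec_three_bytes_to_int dec_list out) := by unfold Spec_three_bytes_to_int; infer_instance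

-- ===== CLAIM (what is proved, stated in full; the proofs are below) =====
def Claim_equal_three_bytes_to_int : Prop := ∀ (dec_list : List Int), Dom_three_bytes_to_int dec_list → Spec_three_bytes_to_int dec_list (three_bytes_to_int dec_list)

-- ===== LEMMAS AND PROOFS =====

-- ===== VERDICT (by name: the statement is the Claim_ definition above) =====
theorem three_bytes_to_int_spec : Claim_equal_three_bytes_to_int := by
  intro dec_list _
  unfold Spec_three_bytes_to_int three_bytes_to_int three_bytes_to_int_alt
  match dec_list with
  | [] => rfl
  | [_] => rfl
  | [_, _] => rfl
  | _ :: _ :: _ :: _ :: _ => simp [List.length]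
  | [a, b, c] =>
    simp [PySem.List.pyGet?, PySem.List.pyIdx?, List.foldl]
    split_ifs <;> omega
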